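-- pv_equiv track=rewrite | github.com/mariosv/aoc22 | day-3/python/main.py | process
-- ===== SOURCE A (Python) =====
-- def score(c):
--     if c.islower():
--         return ord(c) - ord('a') + 1
--     return ord(c) - ord('A') + 27
--
-- def process(data):
--     indices = []
--     index = set()
--     for i, d in enumerate(data):
--         if 0 == i:
--             for t in d:
--                 index.add(t)
--         else:
--             new_index = set()
--             for t in d:
--                 if t in index:
--                     new_index.add(t)
--             index = new_index
--     if len(index) != 1:
--         raise Exception("Invalid input")
--     return score(index.pop())
-- ===== SOURCE B (Python) =====
-- def score(c):
--     if c.islower():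
--         return ord(c) - ord('a') + 1
--     return ord(c) - ord('A') + 27
--
-- def process(data):
--     counts = {}
--     for line in data:
--         for c in set(line):
--             counts[c] = counts.get(c, 0) + 1
--     common = [c for c, n in counts.items() if n == len(data)]
--     if len(common) != 1:
--         raise Exception("Invalid input")
--     return score(common[0])
-- ===== Notes on version B (the rewrite author's own statement) =====
-- stated objective: alternative
-- what changed: Replaces the running set-intersection across lines by building one frequency table (char -> number of lines containing it, counting each char once per line) and then filtering for chars whose count equals the number of lines.
import Mathlib
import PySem

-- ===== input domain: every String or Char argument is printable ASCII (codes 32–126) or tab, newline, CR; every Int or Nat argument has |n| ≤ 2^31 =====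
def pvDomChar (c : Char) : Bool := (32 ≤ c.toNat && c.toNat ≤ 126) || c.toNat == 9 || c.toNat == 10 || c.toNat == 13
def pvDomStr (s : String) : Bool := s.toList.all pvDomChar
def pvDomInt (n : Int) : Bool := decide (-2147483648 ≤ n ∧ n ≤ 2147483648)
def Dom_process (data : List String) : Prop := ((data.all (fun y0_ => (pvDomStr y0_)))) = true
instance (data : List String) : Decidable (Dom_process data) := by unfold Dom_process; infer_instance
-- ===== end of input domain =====

-- B changes the algorithm: a frequency table over each line's distinct chars replaces A's
-- running set intersection; equal cost, different shape ("alternative").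

-- Python's score(c), as in Source A
def pyScoreA (c : Char) : Int :=
  if PySem.Chars.islower c then (c.toNat : Int) - 97 + 1
  else (c.toNat : Int) - 65 + 27

-- Python's score(c), as in Source B
def pyScoreB (c : Char) : Int :=
  if PySem.Chars.islower c then (c.toNat : Int) - 97 + 1
  else (c.toNat : Int) - 65 + 27

-- ===== PORT A =====
-- literal port of A's loop over enumerate(data); where the Python raises
-- Exception("Invalid input") (len(index) ≠ 1) the input is outside Pre_process and we return 0.
def process (data : List String) : Int :=
  let index : PySem.Set Char :=
    (PySem.List.enumerate data).foldl
      (fun (index : PySem.Set Char) (p : Int × String) =>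
        if p.1 == 0 then
          p.2.toList.foldl (fun s t => PySem.Set.add s t) index
        else
          p.2.toList.foldl
            (fun ni t => if PySem.Set.contains index t then PySem.Set.add ni t else ni)
            PySem.Set.empty)
      PySem.Set.empty
  if index.length ≠ 1 then 0   -- Python: raise Exception("Invalid input"); excluded by Pre_process
  else pyScoreA index.headI    -- index.pop() on the singleton set

-- ===== PORT B =====
-- literal port of Source B: counts[c] = counts.get(c, 0) + 1 over set(line), then one filter pass.
def process_alt (data : List String) : Int :=
  let counts : PySem.Dict Char Int :=
    data.foldl
      (fun d line =>
        (PySem.Set.ofList line.toList).foldl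
          (fun d c => d.insert c (d.getD c 0 + 1)) d)
      PySem.Dict.empty
  let common : List Char :=
    (counts.items.filter (fun p => p.2 == (data.length : Int))).map Prod.fst
  if common.length ≠ 1 then 0   -- Python: raise Exception("Invalid input"); excluded by Pre_process
  else pyScoreB common.headI    -- common[0] on the singleton list

-- ===== PRECONDITION & SPEC =====
-- Pre_ excludes exactly the inputs on which A raises Exception("Invalid input"): the empty
-- list and inputs whose lines do not have exactly one char in common.
def Pre_process (data : List String) : Prop :=
  data ≠ [] ∧
  ((PySem.List.dedup (data.headI.toList)).filter
      (fun c => data.all (fun d => c ∈ d.toList))).length = 1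
instance (data : List String) : Decidable (Pre_process data) := by
  unfold Pre_process; infer_instance

def pvWitness_process : List String := ["abX", "bcd", "qb"]

def Spec_process (data : List String) (out : Int) : Prop := out = process_alt data
instance (data : List String) (out : Int) : Decidable (Spec_process data out) := by
  unfold Spec_process; infer_instance

-- ===== CLAIM (what is proved, stated in full; the proofs are below) =====
def Claim_equal_process : Prop :=
  ∀ (data : List String), Dom_process data → Pre_process data → Spec_process data (process data)

-- ===== LEMMAS AND PROOFS =====

-- proof-side names for the two ports' intermediate values (defeq to the ports' folds)
def idxA (data : List String) : PySem.Set Char :=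
  (PySem.List.enumerate data).foldl
    (fun (index : PySem.Set Char) (p : Int × String) =>
      if p.1 == 0 then
        p.2.toList.foldl (fun s t => PySem.Set.add s t) index
      else
        p.2.toList.foldl
          (fun ni t => if PySem.Set.contains index t then PySem.Set.add ni t else ni)
          PySem.Set.empty)
    PySem.Set.empty

def interB (index : PySem.Set Char) (line : String) : PySem.Set Char :=
  line.toList.foldl
    (fun ni t => if PySem.Set.contains index t then PySem.Set.add ni t else ni)
    PySem.Set.empty

def flatB (data : List String) : List Char :=
  data.flatMap (fun l => PySem.Set.ofList l.toList)

def commonB (data : List String) : List Char :=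
  (((data.foldl
      (fun d line =>
        (PySem.Set.ofList line.toList).foldl
          (fun d c => d.insert c (d.getD c 0 + 1)) d)
      PySem.Dict.empty : PySem.Dict Char Int).items.filter
        (fun p => p.2 == (data.length : Int))).map Prod.fst)

lemma process_eq_if (data : List String) :
    process data
      = if (idxA data).length ≠ 1 then 0 else pyScoreA (idxA data).headI := rfl

lemma process_alt_eq_if (data : List String) :
    process_alt data
      = if (commonB data).length ≠ 1 then 0 else pyScoreB (commonB data).headI := rfl

lemma eq_singleton {l : List Char} {c : Char} (hn : l.Nodup) (hm : ∀ x, x ∈ l ↔ x = c) :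
    l = [c] := by
  have hc : c ∈ l := (hm c).mpr rfl
  cases l with
  | nil => simp at hc
  | cons a t =>
    have ha : a = c := (hm a).mp (by simp)
    subst ha
    have hnt : a ∉ t := (List.nodup_cons.mp hn).1
    have ht : t = [] := by
      apply List.eq_nil_iff_forall_not_mem.mpr
      intro y hy
      have : y = a := (hm y).mp (by simp [hy])
      exact absurd (this ▸ hy) hnt
    simp [ht]

-- A side: membership & nodup of the inner intersection fold
lemma mem_innerA (S : PySem.Set Char) (cs : List Char) (acc : PySem.Set Char) (x : Char) :
    x ∈ cs.foldl (fun ni t => if PySem.Set.contains S t then PySem.Set.add ni t else ni) acc ↔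
      x ∈ acc ∨ (x ∈ cs ∧ x ∈ S) := by
  induction cs generalizing acc with
  | nil => simp
  | cons c cs ih =>
    simp only [List.foldl_cons]
    by_cases h : c ∈ S
    · rw [if_pos ((PySem.Set.contains_iff S c).mpr h), ih, PySem.Set.mem_add]
      simp only [List.mem_cons]
      constructor
      · rintro ((h1 | rfl) | ⟨h2, h3⟩)
        · exact Or.inl h1
        · exact Or.inr ⟨Or.inl rfl, h⟩
        · exact Or.inr ⟨Or.inr h2, h3⟩
      · rintro (h1 | ⟨(rfl | h2), h3⟩)
        · exact Or.inl (Or.inl h1)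
        · exact Or.inl (Or.inr rfl)
        · exact Or.inr ⟨h2, h3⟩
    · rw [if_neg (fun hc => h ((PySem.Set.contains_iff S c).mp hc)), ih]
      simp only [List.mem_cons]
      constructor
      · rintro (h1 | ⟨h2, h3⟩)
        · exact Or.inl h1
        · exact Or.inr ⟨Or.inr h2, h3⟩
      · rintro (h1 | ⟨(rfl | h2), h3⟩)
        · exact Or.inl h1
        · exact absurd h3 h
        · exact Or.inr ⟨h2, h3⟩

lemma nodup_innerA (S : PySem.Set Char) (cs : List Char) (acc : PySem.Set Char)
    (hacc : acc.Nodup) :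
    (cs.foldl (fun ni t => if PySem.Set.contains S t then PySem.Set.add ni t else ni)
      acc).Nodup := by
  induction cs generalizing acc with
  | nil => exact hacc
  | cons c cs ih =>
    simp only [List.foldl_cons]
    split
    · exact ih _ (PySem.Set.nodup_add acc c hacc)
    · exact ih _ hacc

lemma interB_char (S : PySem.Set Char) (l : String) :
    (interB S l).Nodup ∧ ∀ x, x ∈ interB S l ↔ x ∈ l.toList ∧ x ∈ S := by
  refine ⟨nodup_innerA _ _ _ List.nodup_nil, fun x => ?_⟩
  rw [interB, mem_innerA]
  simp [PySem.Set.empty]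

-- the tail of A's enumerate-fold is a plain fold of interB over the lines
lemma foldA_off_zero (ps : List (Int × String)) (s : PySem.Set Char)
    (hps : ∀ p ∈ ps, p.1 ≠ 0) :
    ps.foldl
      (fun (index : PySem.Set Char) (p : Int × String) =>
        if p.1 == 0 then
          p.2.toList.foldl (fun s t => PySem.Set.add s t) index
        else
          p.2.toList.foldl
            (fun ni t => if PySem.Set.contains index t then PySem.Set.add ni t else ni)
            PySem.Set.empty) s
    = (ps.map (fun p => p.2)).foldl interB s := by
  induction ps generalizing s with
  | nil => rfl
  | cons p ps ih =>
    have hp : p.1 ≠ 0 := hps p (by simp)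
    simp only [List.foldl_cons, List.map_cons]
    rw [if_neg (by simpa using hp), ih _ (fun q hq => hps q (by simp [hq]))]
    rfl

lemma foldA_interB (lines : List String) (s : PySem.Set Char) (hs : s.Nodup) :
    (lines.foldl interB s).Nodup ∧
      ∀ x, x ∈ lines.foldl interB s ↔ x ∈ s ∧ ∀ l ∈ lines, x ∈ l.toList := by
  induction lines generalizing s with
  | nil => simp [hs]
  | cons l lines ih =>
    obtain ⟨hn, hm⟩ := ih (interB s l) (interB_char s l).1
    refine ⟨hn, fun x => ?_⟩
    rw [List.foldl_cons, hm, (interB_char s l).2 x]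
    constructor
    · rintro ⟨⟨h1, h2⟩, h3⟩
      refine ⟨h2, fun l' hl' => ?_⟩
      rcases List.mem_cons.mp hl' with rfl | hl'
      · exact h1
      · exact h3 l' hl'
    · rintro ⟨h2, h3⟩
      exact ⟨⟨h3 l (by simp), h2⟩, fun l' hl' => h3 l' (by simp [hl'])⟩

lemma idxA_char (d : String) (rest : List String) :
    (idxA (d :: rest)).Nodup ∧
      ∀ x, x ∈ idxA (d :: rest) ↔ ∀ l ∈ d :: rest, x ∈ l.toList := by
  have h0 : idxA (d :: rest)
      = (PySem.List.enumerate rest 1).foldl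
          (fun (index : PySem.Set Char) (p : Int × String) =>
            if p.1 == 0 then
              p.2.toList.foldl (fun s t => PySem.Set.add s t) index
            else
              p.2.toList.foldl
                (fun ni t => if PySem.Set.contains index t then PySem.Set.add ni t else ni)
                PySem.Set.empty)
          (PySem.Set.ofList d.toList) := by
    rw [idxA, PySem.List.enumerate_cons, List.foldl_cons]
    norm_num
    rfl
  have hne : ∀ p ∈ PySem.List.enumerate rest 1, p.1 ≠ 0 := by
    intro p hp
    obtain ⟨k, hk, rfl⟩ := (PySem.List.mem_enumerate_iff rest 1 p).mp hp
    simp only []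
    omega
  rw [h0, foldA_off_zero _ _ hne, PySem.List.map_snd_enumerate]
  obtain ⟨hn, hm⟩ := foldA_interB rest (PySem.Set.ofList d.toList)
    (PySem.Set.nodup_ofList d.toList)
  refine ⟨hn, fun x => ?_⟩
  rw [hm x, PySem.Set.mem_ofList]
  constructor
  · rintro ⟨h1, h2⟩ l hl
    rcases List.mem_cons.mp hl with rfl | hl
    · exact h1
    · exact h2 l hl
  · intro h
    exact ⟨h d (by simp), fun l hl => h l (by simp [hl])⟩

-- B side
lemma countsB_eq (data : List String) :
    (data.foldl
      (fun d line =>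
        (PySem.Set.ofList line.toList).foldl
          (fun d c => d.insert c (d.getD c 0 + 1)) d)
      PySem.Dict.empty : PySem.Dict Char Int)
    = PySem.Dict.counter (flatB data) := by
  rw [flatB, PySem.Dict.counter_eq_foldl, List.foldl_flatMap]
  rfl

lemma count_flatB (data : List String) (x : Char) :
    (flatB data).count x = data.countP (fun l => decide (x ∈ l.toList)) := by
  rw [flatB, List.count, List.countP_flatMap, ← PySem.List.sum_map_ite_one_zero_nat]
  congr 1
  apply List.map_congr_left
  intro l _
  simp only [Function.comp_apply]
  show List.count x (PySem.Set.ofList l.toList) = _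
  by_cases h : x ∈ l.toList
  · rw [List.count_eq_one_of_mem (PySem.Set.nodup_ofList l.toList)
      ((PySem.Set.mem_ofList l.toList x).mpr h), if_pos (by simpa using h)]
  · rw [List.count_eq_zero.mpr (fun hc => h ((PySem.Set.mem_ofList l.toList x).mp hc)),
      if_neg (by simpa using h)]

lemma commonB_char (data : List String) :
    (commonB data).Nodup ∧
      ∀ x, x ∈ commonB data ↔
        x ∈ flatB data ∧ (flatB data).count x = data.length := by
  have h : commonB data
      = ((PySem.Set.ofList (flatB data)).filter
          (fun k => (((flatB data).count k : Int) == (data.length : Int)))).map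
            (fun k => Prod.fst (k, ((flatB data).count k : Int))) := by
    rw [commonB, countsB_eq, PySem.Dict.items_counter, List.filter_map, List.map_map]
    rfl
  simp only [h, List.map_id']
  refine ⟨(PySem.Set.nodup_ofList (flatB data)).filter _, fun x => ?_⟩
  rw [List.mem_filter, PySem.Set.mem_ofList]
  simp only [beq_iff_eq, Nat.cast_inj]

-- Pre_: the unique common character
lemma pre_unique (data : List String) (h : Pre_process data) :
    ∃ c₀, ∀ x, (∀ l ∈ data, x ∈ l.toList) ↔ x = c₀ := by
  obtain ⟨hne, hlen⟩ := h
  obtain ⟨c₀, hc₀⟩ := List.length_eq_one_iff.mp hlen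
  refine ⟨c₀, fun x => ?_⟩
  obtain ⟨d, rest, rfl⟩ := List.exists_cons_of_ne_nil hne
  constructor
  · intro hx
    have hxF : x ∈ (PySem.List.dedup ((d :: rest).headI.toList)).filter
        (fun c => (d :: rest).all (fun l => decide (c ∈ l.toList))) := by
      rw [List.mem_filter, PySem.List.mem_dedup]
      refine ⟨by simpa using hx d (by simp), by simpa [List.all_eq_true] using hx⟩
    rw [hc₀] at hxF
    simpa using hxF
  · rintro rfl
    have hc : x ∈ (PySem.List.dedup ((d :: rest).headI.toList)).filter
        (fun c => (d :: rest).all (fun l => decide (c ∈ l.toList))) := by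
      rw [hc₀]; simp
    rw [List.mem_filter] at hc
    simpa [List.all_eq_true] using hc.2

-- ===== VERDICT (by name: the statement is the Claim_ definition above) =====
theorem process_spec : Claim_equal_process := by
  unfold Claim_equal_process
  intro data _ hpre
  obtain ⟨c₀, huniq⟩ := pre_unique data hpre
  obtain ⟨d, rest, rfl⟩ := List.exists_cons_of_ne_nil hpre.1
  have hA : idxA (d :: rest) = [c₀] := by
    obtain ⟨hn, hm⟩ := idxA_char d rest
    exact eq_singleton hn (fun x => (hm x).trans (huniq x))
  have hB : commonB (d :: rest) = [c₀] := by
    obtain ⟨hn, hm⟩ := commonB_char (d :: rest)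
    refine eq_singleton hn (fun x => (hm x).trans ?_)
    rw [← huniq x]
    constructor
    · rintro ⟨-, hcnt⟩
      rw [count_flatB] at hcnt
      have hall := List.countP_eq_length.mp hcnt
      intro l hl
      simpa using hall l hl
    · intro hall
      refine ⟨?_, ?_⟩
      · rw [flatB]
        exact List.mem_flatMap.mpr
          ⟨d, by simp, (PySem.Set.mem_ofList d.toList x).mpr (hall d (by simp))⟩
      · rw [count_flatB]
        exact List.countP_eq_length.mpr (fun l hl => by simpa using hall l hl)
  rw [Spec_process, process_eq_if, process_alt_eq_if, hA, hB]
  simp [pyScoreA, pyScoreB]
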